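-- pv_equiv track=rewrite | github.com/pcanabarro/automatons | main.py | even_number_of_zeros_automaton
-- ===== SOURCE A (Python) =====
-- def even_number_of_zeros_automaton(string):
--     current_state = 0
--     for symbol in string:
--         if current_state == 0 and symbol == '0':
--             current_state = 1
--         elif current_state == 1 and symbol == '0':
--             current_state = 0
--
--     return current_state == 0
-- ===== SOURCE B (Python) =====
-- def even_number_of_zeros_automaton(string):
--     return sum(1 for c in string if c == '0') % 2 == 0
-- ===== Notes on version B (the rewrite author's own statement) =====
-- stated objective: simpler
-- what changed: B replaces the two-state automaton toggled during the scan by a single count of zero characters followed by a closed-form parity test (count % 2 == 0).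
import Mathlib
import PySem

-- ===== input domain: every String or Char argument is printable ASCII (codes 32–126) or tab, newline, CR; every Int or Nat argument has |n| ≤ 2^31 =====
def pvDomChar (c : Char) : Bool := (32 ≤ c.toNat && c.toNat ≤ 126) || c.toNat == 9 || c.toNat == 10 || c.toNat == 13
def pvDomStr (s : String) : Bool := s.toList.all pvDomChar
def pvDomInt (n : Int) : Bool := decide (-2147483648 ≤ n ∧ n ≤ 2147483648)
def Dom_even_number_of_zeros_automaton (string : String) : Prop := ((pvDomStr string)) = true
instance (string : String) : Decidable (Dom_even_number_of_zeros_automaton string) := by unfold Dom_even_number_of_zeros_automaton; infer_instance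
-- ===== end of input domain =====

-- B replaces the running two-state parity automaton by counting zero characters and testing the count's parity; objective: simpler.


-- ===== PORT A =====
-- A: current_state toggles between 0 and 1 on each zero character; returns current_state == 0.
def even_number_of_zeros_automaton (string : String) : Bool :=
  (string.toList.foldl
    (fun st c =>
      if st == (0 : Int) && c == '0' then 1
      else if st == (1 : Int) && c == '0' then 0
      else st)
    (0 : Int)) == 0

-- ===== PORT B =====
-- B: sum of 1 over the zero characters, then parity test on the total
def even_number_of_zeros_automaton_alt (string : String) : Bool :=
  PySem.Int.mod
    (string.toList.foldl (fun acc c => if c == '0' then acc + 1 else acc) (0 : Int)) 2 == 0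

-- ===== PRECONDITION & SPEC =====
def Spec_even_number_of_zeros_automaton (string : String) (out : Bool) : Prop := out = even_number_of_zeros_automaton_alt string
instance (string : String) (out : Bool) : Decidable (Spec_even_number_of_zeros_automaton string out) := by unfold Spec_even_number_of_zeros_automaton; infer_instance

-- ===== CLAIM (what is proved, stated in full; the proofs are below) =====
def Claim_equal_even_number_of_zeros_automaton : Prop := ∀ (string : String), Dom_even_number_of_zeros_automaton string → Spec_even_number_of_zeros_automaton string (even_number_of_zeros_automaton string)

-- ===== LEMMAS AND PROOFS =====

-- A's loop invariant: from a state in {0,1} the automaton ends in the parity of (start + number of zero characters).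
-- A's step function, named for the proofs (definitionally the lambda in the port).
def pvStepA (st : Int) (c : Char) : Int :=
  if st == (0 : Int) && c == '0' then 1
  else if st == (1 : Int) && c == '0' then 0
  else st

-- A's loop invariant: from a state in {0,1} the automaton ends in the parity of (start + number of zero characters).
theorem pvAutomatonLoop (l : List Char) :
    ∀ st : Int, st = 0 ∨ st = 1 →
      l.foldl pvStepA st = (st + (l.count '0' : Int)) % 2 := by
  induction l with
  | nil =>
    rintro st (rfl | rfl) <;> simp
  | cons c t ih =>
    rintro st (rfl | rfl) <;> by_cases hc : c = '0' <;>
      rw [List.foldl_cons] <;>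
      [ (rw [show pvStepA 0 c = 1 by simp [pvStepA, hc], ih 1 (Or.inr rfl)]);
        (rw [show pvStepA 0 c = 0 by simp [pvStepA, hc], ih 0 (Or.inl rfl)]);
        (rw [show pvStepA 1 c = 0 by simp [pvStepA, hc], ih 0 (Or.inl rfl)]);
        (rw [show pvStepA 1 c = 1 by simp [pvStepA, hc], ih 1 (Or.inr rfl)]) ] <;>
      simp [hc] <;> omega

theorem even_number_of_zeros_automaton_spec : Claim_equal_even_number_of_zeros_automaton := by
  intro s _
  unfold Spec_even_number_of_zeros_automaton
  unfold even_number_of_zeros_automaton even_number_of_zeros_automaton_alt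
  rw [show (fun st c => if st == (0 : Int) && c == '0' then 1
      else if st == (1 : Int) && c == '0' then 0 else st) = pvStepA from rfl,
    pvAutomatonLoop s.toList 0 (Or.inl rfl), PySem.List.foldl_beq_add_one]
  simp only [PySem.Int.mod, Int.fmod_eq_emod]
  simp
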